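-- pv_equiv track=rewrite | github.com/deltaldev/python | merged_source.py | del_mentions
-- ===== SOURCE A (Python) =====
-- def del_mentions(a):
--     s = ''
--     inm = False
--     for i in range(len(a)):
--         if a[i] == '[':
--             inm = True
--         if a[i] == ']':
--             inm = False
--         else:
--             if not inm:
--                 s += a[i]
--     return s
-- ===== SOURCE B (Python) =====
-- def del_mentions(a):
--     out = []
--     i = 0
--     n = len(a)
--     while i < n:
--         c = a[i]
--         if c == '[':
--             j = a.find(']', i)
--             i = n if j == -1 else j + 1
--         elif c == ']':
--             i += 1
--         else:
--             out.append(c)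
--             i += 1
--     return ''.join(out)
-- ===== Notes on version B (the rewrite author's own statement) =====
-- stated objective: alternative
-- what changed: Replaces the boolean in-bracket flag carried through a character-by-character loop with an index-jumping scan that, on '[', uses find(']') to skip the whole bracketed region at once and collects kept characters in a list joined at the end.
import Mathlib
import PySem

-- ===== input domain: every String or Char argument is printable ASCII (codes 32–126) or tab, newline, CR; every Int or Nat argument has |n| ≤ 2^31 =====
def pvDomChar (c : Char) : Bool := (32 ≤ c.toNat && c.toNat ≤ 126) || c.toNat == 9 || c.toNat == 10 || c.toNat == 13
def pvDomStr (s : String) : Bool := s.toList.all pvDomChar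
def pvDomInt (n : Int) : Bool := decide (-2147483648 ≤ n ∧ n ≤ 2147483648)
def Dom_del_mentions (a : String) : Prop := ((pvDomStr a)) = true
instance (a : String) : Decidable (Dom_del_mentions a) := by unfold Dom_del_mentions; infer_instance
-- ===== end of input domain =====

-- B change: skips each '['-opened region in one jump (find ']') instead of A's per-character boolean flag.

-- ===== PORT A =====
-- literal port of A: loop over the characters carrying (s, inm); '[' sets the flag,
-- ']' clears it and is dropped, any other char is appended only when the flag is off.
def delMentionsStep (st : List Char × Bool) (c : Char) : List Char × Bool :=
  let inm := if c = '[' then true else st.2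
  if c = ']' then (st.1, false)
  else if inm then (st.1, inm) else (st.1 ++ [c], inm)

def del_mentions (a : String) : String :=
  String.ofList (a.toList.foldl delMentionsStep ([], false)).1

-- ===== PORT B =====
-- port of Source B's while loop: on '[' jump past the first following ']' ('j = a.find(']', i); i = j+1'),
-- rendered exactly as dropWhile (· ≠ ']') then drop 1; stray ']' is skipped; other chars are kept.
def delMentionsAltGo : List Char → List Char
  | [] => []
  | c :: rest =>
    if c = '[' then delMentionsAltGo ((rest.dropWhile (· ≠ ']')).drop 1)
    else if c = ']' then delMentionsAltGo rest
    else c :: delMentionsAltGo rest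
termination_by l => l.length
decreasing_by
  · have h1 := List.length_dropWhile_le (fun x => decide (x ≠ ']')) rest
    have h2 := List.length_drop (l := rest.dropWhile (fun x => decide (x ≠ ']'))) (i := 1)
    simp at h1 h2 ⊢; omega
  all_goals simp

def del_mentions_alt (a : String) : String :=
  String.ofList (delMentionsAltGo a.toList)

-- ===== PRECONDITION & SPEC =====
def Spec_del_mentions (a : String) (out : String) : Prop := out = del_mentions_alt a
instance (a : String) (out : String) : Decidable (Spec_del_mentions a out) := by unfold Spec_del_mentions; infer_instance

-- ===== CLAIM (what is proved, stated in full; the proofs are below) =====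
def Claim_equal_del_mentions : Prop := ∀ (a : String), Dom_del_mentions a → Spec_del_mentions a (del_mentions a)

-- ===== LEMMAS AND PROOFS =====

-- loop invariant for A's fold: with the flag off it computes B's recursion; with the flag on
-- it first discards up to and including the next ']' — exactly B's jump.
lemma del_mentions_key (l : List Char) : ∀ (acc : List Char) (inm : Bool),
    (l.foldl delMentionsStep (acc, inm)).1
    = acc ++ delMentionsAltGo (if inm then (l.dropWhile (· ≠ ']')).drop 1 else l) := by
  induction l with
  | nil =>
    intro acc inm
    cases inm <;> simp [delMentionsAltGo]
  | cons c rest ih =>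
    intro acc inm
    by_cases h1 : c = '['
    · subst h1
      cases inm <;>
        simp [delMentionsStep, ih acc true, delMentionsAltGo, List.dropWhile]
    · by_cases h2 : c = ']'
      · subst h2
        cases inm <;>
          simp [delMentionsStep, ih acc false, delMentionsAltGo, List.dropWhile]
      · cases inm
        · have := ih (acc ++ [c]) false
          simp only [Bool.false_eq_true, if_false] at this ⊢
          simp [delMentionsStep, h1, h2, this, delMentionsAltGo]
        · have := ih acc true
          simp only [if_true] at this
          simp [delMentionsStep, h1, h2, this, List.dropWhile]

-- ===== VERDICT (by name: the statement is the Claim_ definition above) =====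
theorem del_mentions_spec : Claim_equal_del_mentions := by
  intro a _
  unfold Spec_del_mentions del_mentions del_mentions_alt
  rw [del_mentions_key a.toList [] false]
  simp
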